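-- pv_equiv track=rewrite | github.com/benedettacandelori/ADM3_Group6 | custom_search_engine.py | union_argmax
-- ===== SOURCE A (Python) =====
-- def union_argmax( inverted_words, pointers ):
--     '''
--     this function computes the indices corresponding to
--     the greatest pointed value of the dictionary of inverted words
--
--     input: dictionary of inverted words, pointers
--     output: indices corresponding to the greatest value in the input lists
--     '''
--
--     # initializing the list that will store the keys and the greatest value
--     max_couple = [[],-1]
--
--     for current_word in inverted_words.keys():
--
--         if inverted_words[current_word][pointers[current_word]] > max_couple[1]:
--             # if I find a greater element I replace the values in max_couple
--             max_couple[0] = [current_word]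
--             max_couple[1] = inverted_words[current_word][pointers[current_word]]
--
--         elif inverted_words[current_word][pointers[current_word]] == max_couple[1]:
--             # if I find another (equal) maximum, I store the index
--             max_couple[0].append(current_word)
--
--     return(max_couple[0])
-- ===== SOURCE B (Python) =====
-- def union_argmax(inverted_words, pointers):
--     # two-pass: compute each key's pointed value, then keep the keys attaining
--     # the maximum, in dict order
--     vals = {k: lst[pointers[k]] for k, lst in inverted_words.items()}
--     if not vals:
--         return []
--     m = max(vals.values())
--     return [k for k, v in vals.items() if v == m]
-- ===== Notes on version B (the rewrite author's own statement) =====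
-- stated objective: alternative
-- what changed: Replaces the single running-max pass with mutable reset/append state by a two-pass max-then-filter: build the pointed value per key, take the maximum, then keep the keys attaining it in dict order.
-- intended difference: On nonempty dicts whose pointed values are all below -1, A's -1 running-max sentinel makes it return [] although a maximum exists; B returns the keys attaining the true maximum, which is what the function's docstring promises. — e.g. on union_argmax([("a", [-5])], [("a", 0)]): A returns [], B returns ["a"]
import Mathlib
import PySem

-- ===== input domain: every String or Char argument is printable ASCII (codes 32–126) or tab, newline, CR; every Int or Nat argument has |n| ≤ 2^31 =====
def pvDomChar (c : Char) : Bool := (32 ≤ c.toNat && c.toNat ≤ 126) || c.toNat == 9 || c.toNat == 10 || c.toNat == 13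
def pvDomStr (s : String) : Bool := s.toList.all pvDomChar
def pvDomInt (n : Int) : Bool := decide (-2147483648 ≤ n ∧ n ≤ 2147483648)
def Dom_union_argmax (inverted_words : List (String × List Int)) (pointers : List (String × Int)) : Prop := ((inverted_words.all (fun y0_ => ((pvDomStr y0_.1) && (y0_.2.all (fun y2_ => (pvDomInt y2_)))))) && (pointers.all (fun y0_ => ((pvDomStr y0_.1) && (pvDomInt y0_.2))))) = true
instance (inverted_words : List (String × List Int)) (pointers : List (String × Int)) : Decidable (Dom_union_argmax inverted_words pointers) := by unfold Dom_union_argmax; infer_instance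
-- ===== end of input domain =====

-- B replaces A's single running-max pass (reset/append state) by a two-pass
-- max-then-filter over precomputed pointed values; alternative decomposition, same cost.


-- ===== PORT A =====
def union_argmax (inverted_words : List (String × List Int)) (pointers : List (String × Int)) : List String :=
  let d := PySem.Dict.ofList inverted_words
  let p := PySem.Dict.ofList pointers
  -- max_couple = [[], -1]; for current_word in inverted_words.keys(): …
  let max_couple := d.items.foldl (fun (acc : List String × Int) kv =>
    if PySem.List.pyGetD kv.2 (p.getD kv.1 0) 0 > acc.2 then
      ([kv.1], PySem.List.pyGetD kv.2 (p.getD kv.1 0) 0)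
    else if PySem.List.pyGetD kv.2 (p.getD kv.1 0) 0 = acc.2 then
      (acc.1 ++ [kv.1], acc.2)
    else acc) ([], -1)
  max_couple.1

-- ===== PORT B =====
def union_argmax_alt (inverted_words : List (String × List Int)) (pointers : List (String × Int)) : List String :=
  let d := PySem.Dict.ofList inverted_words
  let p := PySem.Dict.ofList pointers
  -- vals = {k: lst[pointers[k]] for k, lst in inverted_words.items()}  (as its items list; keys are distinct)
  let vals : List (String × Int) := d.items.map (fun kv => (kv.1, PySem.List.pyGetD kv.2 (p.getD kv.1 0) 0))
  -- if not vals: return []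
  if vals.isEmpty then []
  else
    -- m = max(vals.values())
    let m := (PySem.List.max? (vals.map (·.2)) (fun y => y)).getD 0
    -- [k for k, v in vals.items() if v == m]
    (vals.filter (fun kv => kv.2 == m)).map (·.1)

-- ===== PRECONDITION & SPEC =====
-- Pre_ excludes exactly the inputs where Python A raises: a key of inverted_words missing
-- from pointers (KeyError) or a pointer outside Python's index range for its list (IndexError).
def Pre_union_argmax (inverted_words : List (String × List Int)) (pointers : List (String × Int)) : Prop :=
  ((PySem.Dict.ofList inverted_words).items.all (fun kv =>
      match (PySem.Dict.ofList pointers).get? kv.1 with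
      | some i => decide (PySem.Raise.InRange kv.2.length i)
      | none => false)) = true
instance (inverted_words : List (String × List Int)) (pointers : List (String × Int)) : Decidable (Pre_union_argmax inverted_words pointers) := by unfold Pre_union_argmax; infer_instance

def pvWitness_union_argmax : (List (String × List Int)) × (List (String × Int)) :=
  ([("a", [3, 7]), ("b", [7])], [("a", 1), ("b", -1)])

-- On a nonempty dict whose pointed values are all below -1, A's -1 running-max sentinel
-- makes it return [] although a maximum exists; B returns the keys attaining the true
-- maximum, which is what the function's docstring promises.
def D_union_argmax (inverted_words : List (String × List Int)) (pointers : List (String × Int)) : Prop :=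
  (PySem.Dict.ofList inverted_words).items ≠ [] ∧
    ∀ kv ∈ (PySem.Dict.ofList inverted_words).items,
      PySem.List.pyGetD kv.2 ((PySem.Dict.ofList pointers).getD kv.1 0) 0 < -1
instance (inverted_words : List (String × List Int)) (pointers : List (String × Int)) : Decidable (D_union_argmax inverted_words pointers) := by unfold D_union_argmax; infer_instance

def Spec_union_argmax (inverted_words : List (String × List Int)) (pointers : List (String × Int)) (out : List String) : Prop := ¬ D_union_argmax inverted_words pointers → out = union_argmax_alt inverted_words pointers
instance (inverted_words : List (String × List Int)) (pointers : List (String × Int)) (out : List String) : Decidable (Spec_union_argmax inverted_words pointers out) := by unfold Spec_union_argmax; infer_instance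

def pvDiffWitness_union_argmax : (List (String × List Int)) × (List (String × Int)) :=
  ([("a", [-5])], [("a", 0)])
def pvDiffWitnessOut_union_argmax : (List String) × (List String) := ([], ["a"])

-- ===== CLAIM (what is proved, stated in full; the proofs are below) =====
def Claim_unchanged_union_argmax : Prop := ∀ (inverted_words : List (String × List Int)) (pointers : List (String × Int)), Dom_union_argmax inverted_words pointers → Pre_union_argmax inverted_words pointers → Spec_union_argmax inverted_words pointers (union_argmax inverted_words pointers)
def Claim_changed_union_argmax : Prop := Dom_union_argmax (pvDiffWitness_union_argmax.1) (pvDiffWitness_union_argmax.2) ∧ Pre_union_argmax (pvDiffWitness_union_argmax.1) (pvDiffWitness_union_argmax.2) ∧ D_union_argmax (pvDiffWitness_union_argmax.1) (pvDiffWitness_union_argmax.2) ∧ union_argmax (pvDiffWitness_union_argmax.1) (pvDiffWitness_union_argmax.2) = pvDiffWitnessOut_union_argmax.1 ∧ union_argmax_alt (pvDiffWitness_union_argmax.1) (pvDiffWitness_union_argmax.2) = pvDiffWitnessOut_union_argmax.2 ∧ pvDiffWitnessOut_union_argmax.1 ≠ pvDiffWitnessOut_union_argmax.2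
def Claim_exact_union_argmax : Prop := ∀ (inverted_words : List (String × List Int)) (pointers : List (String × Int)), Dom_union_argmax inverted_words pointers → Pre_union_argmax inverted_words pointers → D_union_argmax inverted_words pointers → union_argmax inverted_words pointers ≠ union_argmax_alt inverted_words pointers

-- ===== LEMMAS AND PROOFS =====

-- A's loop body, abstracted over the already-computed pointed value kv.2
def pvStepA (acc : List String × Int) (kv : String × Int) : List String × Int :=
  if kv.2 > acc.2 then ([kv.1], kv.2)
  else if kv.2 = acc.2 then (acc.1 ++ [kv.1], acc.2)
  else acc

-- A's running-max loop computes: the running maximum, and (the initial keys if the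
-- maximum never moved, else nothing) followed by all keys attaining the maximum.
lemma pv_fold_argmax (L : List (String × Int)) (ks : List String) (m : Int) :
    L.foldl pvStepA (ks, m) =
      ((if L.foldl (fun a kv => max a kv.2) m = m then ks else []) ++
        (L.filter (fun kv => kv.2 == L.foldl (fun a kv => max a kv.2) m)).map (·.1),
       L.foldl (fun a kv => max a kv.2) m) := by
  induction L generalizing ks m with
  | nil => simp
  | cons h t ih =>
    obtain ⟨k, v⟩ := h
    have hle := (PySem.List.le_foldl_max_int t (·.2) (max m v)).1
    simp only [List.foldl_cons]
    rcases lt_trichotomy m v with hlt | rfl | hgt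
    · have hstep : pvStepA (ks, m) (k, v) = ([k], v) := by simp [pvStepA, hlt]
      rw [hstep]
      simp only [max_eq_right hlt.le]
      rw [ih]
      have hM : v ≤ List.foldl (fun a (kv : String × Int) => max a kv.2) v t := by
        have h2 : max m v = v := max_eq_right hlt.le
        rw [h2] at hle; exact hle
      by_cases hvM : List.foldl (fun a (kv : String × Int) => max a kv.2) v t = v
      · rw [hvM]
        simp [(show ¬ (v = m) by omega)]
      · have hvm : ¬ (List.foldl (fun a (kv : String × Int) => max a kv.2) v t = m) := by omega
        have hvM' : ¬ (v = List.foldl (fun a (kv : String × Int) => max a kv.2) v t) :=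
          fun h => hvM h.symm
        simp [beq_iff_eq, hvm, hvM', hvM]
    · have hstep : pvStepA (ks, m) (k, m) = (ks ++ [k], m) := by simp [pvStepA]
      rw [hstep]
      simp only [max_self]
      rw [ih]
      have hM : m ≤ List.foldl (fun a (kv : String × Int) => max a kv.2) m t := by
        have h2 : max m m = m := max_self m
        rw [h2] at hle; exact hle
      by_cases hvM : List.foldl (fun a (kv : String × Int) => max a kv.2) m t = m
      · rw [hvM]
        simp [List.filter_cons]
      · have hvM' : ¬ (m = List.foldl (fun a (kv : String × Int) => max a kv.2) m t) :=
          fun h => hvM h.symm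
        simp [beq_iff_eq, hvM, hvM']
    · have hstep : pvStepA (ks, m) (k, v) = (ks, m) := by
        simp [pvStepA, (show ¬ v > m by omega), (show ¬ v = m by omega)]
      rw [hstep]
      simp only [max_eq_left hgt.le]
      rw [ih]
      have hM : m ≤ List.foldl (fun a (kv : String × Int) => max a kv.2) m t := by
        have h2 : max m v = m := max_eq_left hgt.le
        rw [h2] at hle; exact hle
      have hvM' : ¬ (v = List.foldl (fun a (kv : String × Int) => max a kv.2) m t) := by omega
      simp [beq_iff_eq, hvM']

lemma pv_foldl_max_comm (l : List Int) (a b : Int) :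
    l.foldl max (max a b) = max a (l.foldl max b) := by
  induction l generalizing b with
  | nil => rfl
  | cons c t ih => simpa [max_assoc] using ih (max b c)

-- the pointed-value list used by both sides
def pvVals (inverted_words : List (String × List Int)) (pointers : List (String × Int)) : List (String × Int) :=
  (PySem.Dict.ofList inverted_words).items.map
    (fun kv => (kv.1, PySem.List.pyGetD kv.2 ((PySem.Dict.ofList pointers).getD kv.1 0) 0))

-- A's result is the keys of pvVals whose value equals the running max started at -1
lemma pv_A_eq (iw : List (String × List Int)) (ps : List (String × Int)) :
    union_argmax iw ps =
      ((pvVals iw ps).filter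
        (fun kv => kv.2 == ((pvVals iw ps).map (·.2)).foldl max (-1))).map (·.1) := by
  have e1 : union_argmax iw ps = (List.foldl pvStepA ([], -1) (pvVals iw ps)).1 := by
    unfold union_argmax pvVals
    rw [List.foldl_map]
    rfl
  rw [e1, pv_fold_argmax]
  simp [List.foldl_map]

lemma pv_B_eq (iw : List (String × List Int)) (ps : List (String × Int)) :
    union_argmax_alt iw ps =
      (if (pvVals iw ps).isEmpty then []
       else ((pvVals iw ps).filter
          (fun kv => kv.2 == (PySem.List.max? ((pvVals iw ps).map (·.2)) (fun y => y)).getD 0)).map (·.1)) := by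
  unfold union_argmax_alt pvVals
  rfl

-- ===== VERDICT (by name: the statement is the Claim_ definition above) =====
theorem union_argmax_spec : Claim_unchanged_union_argmax := by
  intro iw ps _ _ hnD
  show union_argmax iw ps = union_argmax_alt iw ps
  rw [pv_A_eq, pv_B_eq]
  rcases hv : (pvVals iw ps).map (·.2) with _ | ⟨x, t⟩
  · have : pvVals iw ps = [] := by
      cases h : pvVals iw ps with
      | nil => rfl
      | cons a l => rw [h] at hv; simp at hv
    simp [this]
  · have hne : ¬ (pvVals iw ps).isEmpty := by
      cases h : pvVals iw ps with
      | nil => rw [h] at hv; simp at hv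
      | cons a l => simp
    rw [if_neg hne, hv, PySem.List.max?_id_cons]
    -- ¬D gives some pointed value ≥ -1, hence the floor at -1 is inert
    have hex : ∃ v ∈ x :: t, -1 ≤ v := by
      unfold D_union_argmax at hnD
      push Not at hnD
      have hitems : (PySem.Dict.ofList iw).items ≠ [] := by
        intro h
        have : pvVals iw ps = [] := by unfold pvVals; rw [h]; rfl
        rw [this] at hv; simp at hv
      obtain ⟨kv, hmem, hge⟩ := hnD hitems
      refine ⟨PySem.List.pyGetD kv.2 ((PySem.Dict.ofList ps).getD kv.1 0) 0, ?_, by omega⟩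
      rw [← hv]
      unfold pvVals
      simp only [List.map_map]
      exact List.mem_map.2 ⟨kv, hmem, rfl⟩
    have hge : -1 ≤ t.foldl max x := by
      obtain ⟨v, hmem, hge⟩ := hex
      rcases List.mem_cons.1 hmem with rfl | hm
      · exact le_trans hge (PySem.List.le_foldl_max t v).1
      · exact le_trans hge ((PySem.List.le_foldl_max t x).2 v hm)
    have : (x :: t).foldl max (-1) = t.foldl max x := by
      have h2 : (x :: t).foldl max (-1) = max (-1) (t.foldl max x) := by
        simpa using pv_foldl_max_comm t (-1) x
      rw [h2, max_eq_right hge]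
    rw [this]
    rfl

theorem union_argmax_changed : Claim_changed_union_argmax := by
  unfold Claim_changed_union_argmax; decide

theorem union_argmax_tight : Claim_exact_union_argmax := by
  intro iw ps _ _ hD heq
  obtain ⟨hne, hlt⟩ := hD
  have hvne : pvVals iw ps ≠ [] := by
    unfold pvVals; simpa using hne
  have hall : ∀ v ∈ (pvVals iw ps).map (·.2), v < -1 := by
    intro v hv
    obtain ⟨kv, hm, rfl⟩ := List.mem_map.1 hv
    obtain ⟨kv', hm', hkv⟩ := List.mem_map.1 hm
    subst hkv
    exact hlt kv' hm'
  rcases hv : (pvVals iw ps).map (·.2) with _ | ⟨x, t⟩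
  · exact hvne (by simpa using congrArg List.length hv)
  · -- A's side: running max from -1 stays -1, nothing attains it → A = []
    have hfm : t.foldl max x < -1 := by
      rcases PySem.List.foldl_max_mem t x with h | h
      · rw [h]; exact hall x (hv ▸ List.mem_cons_self ..)
      · exact hall _ (hv ▸ List.mem_cons_of_mem x h)
    have hA : union_argmax iw ps = [] := by
      rw [pv_A_eq, hv]
      have hM : (x :: t).foldl max (-1) = -1 := by
        have h2 : (x :: t).foldl max (-1) = max (-1) (t.foldl max x) := by
          simpa using pv_foldl_max_comm t (-1) x
        rw [h2, max_eq_left (by omega)]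
      rw [hM]
      rw [List.filter_eq_nil_iff.2, List.map_nil]
      intro kv hm
      have : kv.2 < -1 := by
        have : kv.2 ∈ (pvVals iw ps).map (·.2) := List.mem_map.2 ⟨kv, hm, rfl⟩
        exact hall _ this
      simp [beq_iff_eq]; omega
    -- B's side: the max is attained, so the filter is nonempty → B ≠ []
    have hB : union_argmax_alt iw ps ≠ [] := by
      rw [pv_B_eq, if_neg (by cases h : pvVals iw ps with
        | nil => exact absurd h hvne
        | cons a l => simp), hv, PySem.List.max?_id_cons]
      have hmem : t.foldl max x ∈ (pvVals iw ps).map (·.2) := by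
        rw [hv]
        rcases PySem.List.foldl_max_mem t x with h | h
        · rw [h]; exact List.mem_cons_self ..
        · exact List.mem_cons_of_mem x h
      obtain ⟨kv, hm, hkv⟩ := List.mem_map.1 hmem
      intro hnil
      have : kv ∈ (pvVals iw ps).filter (fun kv => kv.2 == (some (t.foldl max x)).getD 0) := by
        simp only [List.mem_filter]
        exact ⟨hm, by simp [hkv]⟩
      rw [List.map_eq_nil_iff.1 hnil] at this
      simp at this
    rw [← heq] at hB
    exact hB hA
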